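-- pv_equiv track=rewrite | github.com/stephenlunt/advent-of-code | 2023/11/main.py | get_galaxy_locs
-- ===== SOURCE A (Python) =====
-- def get_galaxy_locs(data: list[list[str]]):
--     galaxies, y_gals, x_gals = [], set(), set()
--     for y, row in enumerate(data):
--         for x, char in enumerate(row):
--             if char == "#":
--                 galaxies.append((y, x))
--                 y_gals.add(y)
--                 x_gals.add(x)
--
--     return galaxies, y_gals, x_gals
-- ===== SOURCE B (Python) =====
-- def _hits(row):
--     """Indices of '#' in row, found by jumping to the next occurrence
--     (list.index + slicing) instead of testing every cell."""
--     if "#" not in row: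
--         return []
--     i = row.index("#")
--     return [i] + [i + 1 + j for j in _hits(row[i + 1:])]
--
--
-- def get_galaxy_locs(data: list[list[str]]):
--     galaxies = [(y, x) for y, row in enumerate(data) for x in _hits(row)]
--     y_gals = {g[0] for g in galaxies}
--     x_gals = {g[1] for g in galaxies}
--     return galaxies, y_gals, x_gals
-- ===== Notes on version B (the rewrite author's own statement) =====
-- stated objective: alternative
-- what changed: Replaces A's fused cell-by-cell grid scan updating three accumulators with a recursive per-row occurrence search (list.index + slice to jump from one '#' to the next), assembling the galaxy list from those hit lists and deriving the two sets from it afterwards.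
import Mathlib
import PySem

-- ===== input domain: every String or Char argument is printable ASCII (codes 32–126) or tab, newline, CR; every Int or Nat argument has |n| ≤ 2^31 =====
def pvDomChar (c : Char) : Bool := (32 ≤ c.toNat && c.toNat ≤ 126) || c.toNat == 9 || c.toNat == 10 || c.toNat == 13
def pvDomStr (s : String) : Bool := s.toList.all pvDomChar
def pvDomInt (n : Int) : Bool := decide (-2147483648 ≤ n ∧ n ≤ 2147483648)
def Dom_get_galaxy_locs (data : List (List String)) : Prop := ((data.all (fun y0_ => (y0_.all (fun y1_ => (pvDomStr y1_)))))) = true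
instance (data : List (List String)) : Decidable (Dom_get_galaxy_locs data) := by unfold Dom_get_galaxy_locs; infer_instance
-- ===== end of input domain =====

-- B replaces A's fused cell-by-cell grid scan (three accumulators updated together) with a
-- recursive per-row occurrence search (index + slice jumps from '#' to '#'), then derives the
-- two sets from the assembled galaxy list (objective: alternative).


-- ===== PORT A =====
-- fused pass: one fold over the enumerated grid, threading (galaxies, y_gals, x_gals)
def get_galaxy_locs (data : List (List String)) : (List (Int × Int)) × List Int × List Int :=
  (PySem.List.enumerate data).foldl
    (fun st yr =>
      (PySem.List.enumerate yr.2).foldl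
        (fun st2 xc =>
          if xc.2 = "#" then
            (st2.1 ++ [(yr.1, xc.1)], PySem.Set.add st2.2.1 yr.1, PySem.Set.add st2.2.2 xc.1)
          else st2)
        st)
    ([], PySem.Set.empty, PySem.Set.empty)

-- ===== PORT B =====
-- _hits: recursive occurrence search — `row.index("#")` then recurse on `row[i+1:]`
def pvHits (row : List String) : List Int :=
  if _hmem : "#" ∈ row then
    match hidx : PySem.List.index? row "#" with
    | none => []   -- unreachable: "#" ∈ row guarantees index? is some
    | some i => (i : Int) :: (pvHits (row.drop (i + 1))).map (fun j => (i : Int) + 1 + j)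
  else []
termination_by row.length
decreasing_by
  have h := (PySem.List.getElem_of_index?_eq_some hidx).1
  simp only [List.length_drop]
  omega

def get_galaxy_locs_alt (data : List (List String)) : (List (Int × Int)) × List Int × List Int :=
  let galaxies : List (Int × Int) :=
    (PySem.List.enumerate data).flatMap
      (fun yr => (pvHits yr.2).map (fun x => (yr.1, x)))
  (galaxies,
   PySem.Set.ofList (galaxies.map Prod.fst),
   PySem.Set.ofList (galaxies.map Prod.snd))

-- ===== PRECONDITION & SPEC =====
def Spec_get_galaxy_locs (data : List (List String)) (out : (List (Int × Int)) × List Int × List Int) : Prop := out = get_galaxy_locs_alt data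
instance (data : List (List String)) (out : (List (Int × Int)) × List Int × List Int) : Decidable (Spec_get_galaxy_locs data out) := by unfold Spec_get_galaxy_locs; infer_instance

-- ===== CLAIM (what is proved, stated in full; the proofs are below) =====
def Claim_equal_get_galaxy_locs : Prop := ∀ (data : List (List String)), Dom_get_galaxy_locs data → Spec_get_galaxy_locs data (get_galaxy_locs data)

-- ===== LEMMAS AND PROOFS =====

-- galaxies collected from one enumerated row y (characterisation shared by both ports)
def pvRowGal (y : Int) (L : List (Int × String)) : List (Int × Int) :=
  (L.filter (fun xc => xc.2 == "#")).map (fun xc => (y, xc.1))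

lemma pvFilter_enumerate_nil (xs : List String) (s : Int) (h : "#" ∉ xs) :
    (PySem.List.enumerate xs s).filter (fun xc => xc.2 == "#") = [] := by
  rw [List.filter_eq_nil_iff]
  intro p hp
  rcases (PySem.List.mem_enumerate_iff _ _ _).mp hp with ⟨k, hk, rfl⟩
  have : xs[k] ≠ "#" := fun he => h (he ▸ List.getElem_mem hk)
  simpa using this

-- pvHits lists exactly the '#'-positions of the row (shifted by an arbitrary start s)
lemma pvHits_shift (row : List String) : ∀ s : Int,
    (pvHits row).map (fun x => s + x)
      = ((PySem.List.enumerate row s).filter (fun xc => xc.2 == "#")).map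
          (fun xc => xc.1) := by
  intro s
  rw [pvHits.eq_def]
  by_cases hmem : "#" ∈ row
  · rw [dif_pos hmem]
    split
    · next hnone =>
      exact absurd hmem ((PySem.List.index?_eq_none_iff row "#").mp hnone)
    · next i heq =>
      obtain ⟨pre, suf, hrow, hlen, hnot⟩ :=
        (PySem.List.index?_eq_some_iff row "#" i).mp heq
      have hlt := (PySem.List.getElem_of_index?_eq_some heq).1
      have ih := pvHits_shift (row.drop (i + 1))
      have hdrop : row.drop (i + 1) = suf := by
        subst hrow; rw [← hlen]
        rw [show pre ++ "#" :: suf = (pre ++ ["#"]) ++ suf from by simp]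
        simpa using List.drop_left (l₁ := pre ++ ["#"]) (l₂ := suf)
      rw [hdrop] at ih
      subst hrow
      rw [PySem.List.enumerate_append, PySem.List.enumerate_cons,
        List.filter_append, pvFilter_enumerate_nil pre s hnot, List.nil_append,
        List.filter_cons]
      simp only [beq_self_eq_true, if_pos, List.map_cons, List.map_map, hlen,
        List.cons.injEq]
      refine ⟨trivial, ?_⟩
      rw [hdrop, ← ih (s + (i : Int) + 1)]
      apply List.map_congr_left
      intro j _
      simp only [Function.comp_apply]
      ring
  · rw [dif_neg hmem]
    rw [pvFilter_enumerate_nil row s hmem]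
    simp
termination_by row.length
decreasing_by
  simp only [List.length_drop]
  omega

-- B's per-row galaxy list coincides with pvRowGal
lemma pvHits_row (y : Int) (row : List String) :
    (pvHits row).map (fun x => (y, x)) = pvRowGal y (PySem.List.enumerate row) := by
  have h := pvHits_shift row 0
  have h0 : (pvHits row).map (fun x => (0 : Int) + x) = pvHits row := by
    simp
  rw [h0] at h
  rw [pvRowGal, h, List.map_map]
  apply List.map_congr_left
  intro x _
  rfl

lemma pvOfList_append_singleton {α : Type} [BEq α] (l : List α) (a : α) :
    PySem.Set.ofList (l ++ [a]) = PySem.Set.add (PySem.Set.ofList l) a := by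
  simp [PySem.Set.ofList_eq_foldl, List.foldl_append]

-- invariant state for galaxy list g
def pvSt (g : List (Int × Int)) : (List (Int × Int)) × List Int × List Int :=
  (g, PySem.Set.ofList (g.map Prod.fst), PySem.Set.ofList (g.map Prod.snd))

lemma pv_inner (y : Int) (L : List (Int × String)) :
    ∀ g : List (Int × Int),
      L.foldl
        (fun st2 xc =>
          if xc.2 = "#" then
            (st2.1 ++ [(y, xc.1)], PySem.Set.add st2.2.1 y, PySem.Set.add st2.2.2 xc.1)
          else st2)
        (pvSt g)
      = pvSt (g ++ pvRowGal y L) := by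
  induction L with
  | nil => intro g; simp [pvRowGal]
  | cons hd tl ih =>
    intro g
    by_cases h : hd.2 = "#"
    · have : ((pvSt g).1 ++ [(y, hd.1)], PySem.Set.add (pvSt g).2.1 y,
          PySem.Set.add (pvSt g).2.2 hd.1) = pvSt (g ++ [(y, hd.1)]) := by
        simp [pvSt, pvOfList_append_singleton]
      simp only [List.foldl_cons, if_pos h, this, ih (g ++ [(y, hd.1)])]
      simp [pvRowGal, h]
    · simp only [List.foldl_cons, if_neg h, ih, pvRowGal, List.filter_cons]
      have hb : (hd.2 == "#") = false := by simpa using h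
      simp [hb]

lemma pv_outer (E : List (Int × List String)) :
    ∀ g : List (Int × Int),
      E.foldl
        (fun st yr =>
          (PySem.List.enumerate yr.2).foldl
            (fun st2 xc =>
              if xc.2 = "#" then
                (st2.1 ++ [(yr.1, xc.1)], PySem.Set.add st2.2.1 yr.1, PySem.Set.add st2.2.2 xc.1)
              else st2)
            st)
        (pvSt g)
      = pvSt (g ++ E.flatMap (fun yr => pvRowGal yr.1 (PySem.List.enumerate yr.2))) := by
  induction E with
  | nil => intro g; simp
  | cons hd tl ih =>
    intro g
    simp only [List.foldl_cons, pv_inner hd.1 (PySem.List.enumerate hd.2) g, ih,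
      List.flatMap_cons, List.append_assoc]

-- ===== VERDICT (by name: the statement is the Claim_ definition above) =====
theorem get_galaxy_locs_spec : Claim_equal_get_galaxy_locs := by
  intro data _
  show get_galaxy_locs data = get_galaxy_locs_alt data
  have h := pv_outer (PySem.List.enumerate data) []
  simp only [List.nil_append] at h
  have hg : (PySem.List.enumerate data).flatMap
      (fun yr => (pvHits yr.2).map (fun x => (yr.1, x)))
      = (PySem.List.enumerate data).flatMap
        (fun yr => pvRowGal yr.1 (PySem.List.enumerate yr.2)) := by
    apply List.flatMap_congr
    intro yr _
    exact pvHits_row yr.1 yr.2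
  simp only [get_galaxy_locs_alt, hg]
  simpa [get_galaxy_locs, pvSt, PySem.Set.empty] using h
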